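-- pv_equiv track=rewrite | github.com/Svagtlys/PythonExercises | DrawAGameBoard.py | build_board
-- ===== SOURCE A (Python) =====
-- def build_board(width, height):
--     '''
--     Takes in the width and height of the game board
--     Returns a string containing a faux-graphical board
--     '''
--
--     outputrows = ["" for each in range(height*2+1)]
--
--     for row in range(len(outputrows)): #2 parts to each board row: mid and bottom, except first row has top
--         for column in range(width*4+1):# 4 parts to each board column, midleft, mid, midright, right, except first colomn has left
--             if column%4 != 0 and row%2 == 0:#if column# is not 0,4,8, etc && row# is even, add "-" (ZERO INDEX)
--                 outputrows[row] += "-"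
--             elif column%4 == 0 and row%2 == 1: # if column# is 0,4,8, etc && row is odd, add a "|"
--                 outputrows[row] += "|"
--             else:
--                 outputrows[row] += " "
--
--     return "\n".join(outputrows)
-- ===== SOURCE B (Python) =====
-- def build_board(width, height):
--     '''
--     Takes in the width and height of the game board
--     Returns a string containing a faux-graphical board
--     '''
--     return "\n".join((" ---" * width + " ") if row % 2 == 0 else ("|   " * width + "|")
--                      for row in range(height * 2 + 1))
-- ===== Notes on version B (the rewrite author's own statement) =====
-- stated objective: faster
-- what changed: Replaces A's nested per-character loops (indexed rows grown one character at a time) by whole-row templates built with string repetition and selected by row parity in a single pass over the rows.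
-- outside the precondition, e.g. on build_board(-1, 1): A returns '\n\n', B returns ' \n|\n '
import Mathlib
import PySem

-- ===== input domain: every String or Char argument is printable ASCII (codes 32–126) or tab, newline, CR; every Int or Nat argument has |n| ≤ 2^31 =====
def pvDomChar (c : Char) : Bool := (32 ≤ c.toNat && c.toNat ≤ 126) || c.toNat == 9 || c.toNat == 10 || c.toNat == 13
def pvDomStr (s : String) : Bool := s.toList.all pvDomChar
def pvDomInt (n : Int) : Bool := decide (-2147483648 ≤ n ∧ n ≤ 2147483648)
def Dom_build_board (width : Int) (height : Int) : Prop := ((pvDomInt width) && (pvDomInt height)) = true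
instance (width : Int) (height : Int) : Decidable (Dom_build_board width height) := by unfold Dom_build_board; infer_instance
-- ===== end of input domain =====

-- B replaces A's per-character nested loops by two precomputed row templates
-- (string repetition) selected by row parity — simpler, one pass over the rows.


-- ===== PORT A =====
def build_board (width : Int) (height : Int) : String :=
  let outputrows : List String :=
    (PySem.List.pyRange 0 (height * 2 + 1) 1).map (fun _ => "")
  let outputrows :=
    (PySem.List.pyRange 0 (PySem.List.len outputrows) 1).foldl
      (fun rows row =>
        (PySem.List.pyRange 0 (width * 4 + 1) 1).foldl
          (fun rs column =>
            PySem.List.pySetD rs row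
              (PySem.List.pyGetD rs row "" ++
                (if PySem.Int.mod column 4 ≠ 0 ∧ PySem.Int.mod row 2 = 0 then "-"
                 else if PySem.Int.mod column 4 = 0 ∧ PySem.Int.mod row 2 = 1 then "|"
                 else " ")))
          rows)
      outputrows
  PySem.Str.join "\n" outputrows

-- ===== PORT B =====
def build_board_alt (width : Int) (height : Int) : String :=
  PySem.Str.join "\n"
    ((PySem.List.pyRange 0 (height * 2 + 1) 1).map
      (fun row =>
        if PySem.Int.mod row 2 = 0 then String.ofList (PySem.List.pyRepeat " ---".toList width) ++ " "
        else String.ofList (PySem.List.pyRepeat "|   ".toList width) ++ "|"))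

-- ===== PRECONDITION & SPEC =====
-- Pre_ excludes boards with negative width but nonnegative height: there A's inner column
-- loop is empty so every row is "" while B's templates collapse to the single border cell
-- (" " / "|") — a degenerate corner outside the task's natural domain where neither value
-- is specified.
def Pre_build_board (width : Int) (height : Int) : Prop := 0 ≤ width ∨ height < 0
instance (width : Int) (height : Int) : Decidable (Pre_build_board width height) := by
  unfold Pre_build_board; infer_instance

def pvWitness_build_board : Int × Int := (2, 2)

def Spec_build_board (width : Int) (height : Int) (out : String) : Prop := out = build_board_alt width height
instance (width : Int) (height : Int) (out : String) : Decidable (Spec_build_board width height out) := by unfold Spec_build_board; infer_instance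

-- ===== CLAIM (what is proved, stated in full; the proofs are below) =====
def Claim_equal_build_board : Prop := ∀ (width : Int) (height : Int), Dom_build_board width height → Pre_build_board width height → Spec_build_board width height (build_board width height)

-- ===== LEMMAS AND PROOFS =====

lemma inner_loc (ch : Int → String) :
    ∀ (cs : List Int) (rows : List String) (r : Nat), r < rows.length →
      cs.foldl (fun rs c =>
          PySem.List.pySetD rs (r : Int) (PySem.List.pyGetD rs (r : Int) "" ++ ch c)) rows
      = rows.set r (cs.foldl (fun s c => s ++ ch c) (rows.getD r "")) := by
  intro cs
  induction cs with
  | nil =>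
    intro rows r h
    simp only [List.foldl_nil]
    rw [List.getD_eq_getElem _ _ h, List.set_getElem_self h]
  | cons c cs ih =>
    intro rows r h
    rw [List.foldl_cons, List.foldl_cons]
    have h1 : PySem.List.pySetD rows (r : Int) (PySem.List.pyGetD rows (r : Int) "" ++ ch c)
        = rows.set r (rows.getD r "" ++ ch c) := by
      rw [PySem.List.pySetD_natCast, PySem.List.pyGetD_natCast]
    rw [h1, ih _ r (by simpa using h)]
    have h2 : (rows.set r (rows.getD r "" ++ ch c)).getD r "" = rows.getD r "" ++ ch c := by
      rw [List.getD_eq_getElem _ _ (by simpa using h)]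
      exact List.getElem_set_self (by simpa using h)
    rw [h2, List.set_set]

lemma outer_fold (ch : Int → Int → String) (cs : List Int) :
    ∀ (m N : Nat), m ≤ N →
      (List.range m).foldl
        (fun rows (r : Nat) => cs.foldl (fun rs c =>
            PySem.List.pySetD rs (↑r : Int) (PySem.List.pyGetD rs (↑r : Int) "" ++ ch (↑r : Int) c)) rows)
        (List.replicate N "")
      = (List.range m).map (fun (r : Nat) => cs.foldl (fun s c => s ++ ch (↑r : Int) c) "")
        ++ List.replicate (N - m) "" := by
  intro m
  induction m with
  | zero => intro N _; simp
  | succ m ih =>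
    intro N hm
    rw [List.range_succ, List.foldl_append, ih N (by omega), List.foldl_cons, List.foldl_nil]
    have hlen2 : ((List.range m).map (fun (r : Nat) => cs.foldl (fun s c => s ++ ch (↑r : Int) c) "")
        ++ List.replicate (N - m) "").length = N := by simp; omega
    rw [inner_loc _ cs _ m (by rw [hlen2]; omega)]
    have hrep : List.replicate (N - m) ("" : String) = "" :: List.replicate (N - (m+1)) "" := by
      have h : N - m = (N - (m+1)) + 1 := by omega
      rw [h, List.replicate_succ]
    have hgetD : ((List.range m).map (fun (r : Nat) => cs.foldl (fun s c => s ++ ch (↑r : Int) c) "")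
        ++ List.replicate (N - m) "").getD m "" = "" := by
      rw [hrep, List.getD_eq_getElem _ _ (by simp), List.getElem_append_right (by simp)]
      simp
    rw [hgetD, List.set_append, if_neg (by simp), hrep]
    simp

lemma mod4 (a : Int) (k : Nat) (h : a = ↑k) : PySem.Int.mod a 4 = ↑(k % 4) := by
  subst h; exact_mod_cast PySem.Int.mod_natCast k 4

lemma row_even (w : Nat) (r : Int) (hr : PySem.Int.mod r 2 = 0) :
    (PySem.List.pyRange 0 ((w : Int) * 4 + 1) 1).foldl
      (fun s c => s ++
        (if PySem.Int.mod c 4 ≠ 0 ∧ PySem.Int.mod r 2 = 0 then "-"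
         else if PySem.Int.mod c 4 = 0 ∧ PySem.Int.mod r 2 = 1 then "|"
         else " ")) ""
    = String.ofList (PySem.List.pyRepeat " ---".toList (w : Int)) ++ " " := by
  induction w with
  | zero =>
    simp only [Nat.cast_zero, zero_mul, zero_add]
    rw [PySem.List.pyRange_one_cons (by norm_num), PySem.List.pyRange_one_eq_nil (by norm_num)]
    simp only [List.foldl_cons, List.foldl_nil, hr]
    norm_num
    decide
  | succ w ih =>
    have hsplit : PySem.List.pyRange 0 ((↑(w+1) : Int) * 4 + 1) 1
        = PySem.List.pyRange 0 ((w : Int) * 4 + 1) 1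
          ++ [(w : Int) * 4 + 1, (w : Int) * 4 + 2, (w : Int) * 4 + 3, (w : Int) * 4 + 4] := by
      rw [PySem.List.pyRange_one_append 0 ((w : Int) * 4 + 1) _ (by omega) (by push_cast; omega)]
      congr 1
      rw [PySem.List.pyRange_one_cons (by push_cast; omega),
          PySem.List.pyRange_one_cons (by push_cast; omega),
          PySem.List.pyRange_one_cons (by push_cast; omega),
          PySem.List.pyRange_one_cons (by push_cast; omega),
          PySem.List.pyRange_one_eq_nil (by push_cast; omega)]
      norm_num
      omega
    rw [hsplit, List.foldl_append, ih, List.foldl_cons, List.foldl_cons, List.foldl_cons,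
        List.foldl_cons, List.foldl_nil]
    rw [mod4 ((w:Int)*4+1) (w*4+1) (by push_cast; ring),
        mod4 ((w:Int)*4+2) (w*4+2) (by push_cast; ring),
        mod4 ((w:Int)*4+3) (w*4+3) (by push_cast; ring),
        mod4 ((w:Int)*4+4) (w*4+4) (by push_cast; ring)]
    have h1 : (w*4+1) % 4 = 1 := by omega
    have h2 : (w*4+2) % 4 = 2 := by omega
    have h3 : (w*4+3) % 4 = 3 := by omega
    have h4 : (w*4+4) % 4 = 0 := by omega
    rw [h1, h2, h3, h4]
    simp only [hr]
    norm_num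
    apply String.ext
    simp only [String.toList_append, String.toList_ofList, PySem.List.pyRepeat]
    have h5 : ((w : Int) + 1).toNat = w + 1 := by omega
    rw [Nat.cast_succ] at *
    rw [h5, List.replicate_succ', List.flatten_append]
    simp only [List.flatten_cons, List.flatten_nil, List.append_nil, List.append_assoc]
    congr 1

lemma row_odd (w : Nat) (r : Int) (hr : PySem.Int.mod r 2 = 1) :
    (PySem.List.pyRange 0 ((w : Int) * 4 + 1) 1).foldl
      (fun s c => s ++
        (if PySem.Int.mod c 4 ≠ 0 ∧ PySem.Int.mod r 2 = 0 then "-"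
         else if PySem.Int.mod c 4 = 0 ∧ PySem.Int.mod r 2 = 1 then "|"
         else " ")) ""
    = String.ofList (PySem.List.pyRepeat "|   ".toList (w : Int)) ++ "|" := by
  induction w with
  | zero =>
    simp only [Nat.cast_zero, zero_mul, zero_add]
    rw [PySem.List.pyRange_one_cons (by norm_num), PySem.List.pyRange_one_eq_nil (by norm_num)]
    simp only [List.foldl_cons, List.foldl_nil, hr]
    norm_num
    decide
  | succ w ih =>
    have hsplit : PySem.List.pyRange 0 ((↑(w+1) : Int) * 4 + 1) 1
        = PySem.List.pyRange 0 ((w : Int) * 4 + 1) 1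
          ++ [(w : Int) * 4 + 1, (w : Int) * 4 + 2, (w : Int) * 4 + 3, (w : Int) * 4 + 4] := by
      rw [PySem.List.pyRange_one_append 0 ((w : Int) * 4 + 1) _ (by omega) (by push_cast; omega)]
      congr 1
      rw [PySem.List.pyRange_one_cons (by push_cast; omega),
          PySem.List.pyRange_one_cons (by push_cast; omega),
          PySem.List.pyRange_one_cons (by push_cast; omega),
          PySem.List.pyRange_one_cons (by push_cast; omega),
          PySem.List.pyRange_one_eq_nil (by push_cast; omega)]
      norm_num
      omega
    rw [hsplit, List.foldl_append, ih, List.foldl_cons, List.foldl_cons, List.foldl_cons,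
        List.foldl_cons, List.foldl_nil]
    rw [mod4 ((w:Int)*4+1) (w*4+1) (by push_cast; ring),
        mod4 ((w:Int)*4+2) (w*4+2) (by push_cast; ring),
        mod4 ((w:Int)*4+3) (w*4+3) (by push_cast; ring),
        mod4 ((w:Int)*4+4) (w*4+4) (by push_cast; ring)]
    have h1 : (w*4+1) % 4 = 1 := by omega
    have h2 : (w*4+2) % 4 = 2 := by omega
    have h3 : (w*4+3) % 4 = 3 := by omega
    have h4 : (w*4+4) % 4 = 0 := by omega
    rw [h1, h2, h3, h4]
    simp only [hr]
    norm_num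
    apply String.ext
    simp only [String.toList_append, String.toList_ofList, PySem.List.pyRepeat]
    have h5 : ((w : Int) + 1).toNat = w + 1 := by omega
    rw [Nat.cast_succ] at *
    rw [h5, List.replicate_succ', List.flatten_append]
    simp only [List.flatten_cons, List.flatten_nil, List.append_nil, List.append_assoc]
    congr 1

lemma main_neg (width height : Int) (hh : height < 0) :
    build_board width height = build_board_alt width height := by
  simp only [build_board, build_board_alt]
  rw [PySem.List.pyRange_one_eq_nil (show height * 2 + 1 ≤ 0 by omega)]
  simp only [List.map_nil, PySem.List.len_eq, List.length_nil, Nat.cast_zero]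
  rw [PySem.List.pyRange_one_eq_nil (le_refl 0)]
  simp

lemma main_nonneg (width height : Int) (hw : 0 ≤ width) (hh : 0 ≤ height) :
    build_board width height = build_board_alt width height := by
  obtain ⟨w, rfl⟩ : ∃ w : Nat, width = ↑w := ⟨width.toNat, (Int.toNat_of_nonneg hw).symm⟩
  obtain ⟨N, hN⟩ : ∃ N : Nat, height * 2 + 1 = ↑N := ⟨(height * 2 + 1).toNat, (Int.toNat_of_nonneg (by omega)).symm⟩
  simp only [build_board, build_board_alt]
  rw [hN, PySem.List.pyRange_zero_nat]
  have hrows0 : (List.map (fun (k : Nat) => (k : Int)) (List.range N)).map (fun _ => ("" : String))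
      = List.replicate N "" := by
    rw [List.map_const']; simp
  rw [hrows0, PySem.List.len_eq, List.length_replicate, PySem.List.pyRange_zero_nat,
      List.foldl_map, List.map_map]
  rw [outer_fold (fun row c =>
        (if PySem.Int.mod c 4 ≠ 0 ∧ PySem.Int.mod row 2 = 0 then "-"
         else if PySem.Int.mod c 4 = 0 ∧ PySem.Int.mod row 2 = 1 then "|"
         else " ")) (PySem.List.pyRange 0 ((w : Int) * 4 + 1) 1) N N (le_refl N)]
  simp only [Nat.sub_self, List.replicate_zero, List.append_nil]
  congr 1
  apply List.map_congr_left
  intro r _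
  have hmod : PySem.Int.mod (↑r : Int) 2 = ↑(r % 2) := by
    exact_mod_cast PySem.Int.mod_natCast r 2
  simp only [Function.comp_apply]
  rcases Nat.mod_two_eq_zero_or_one r with hp | hp
  · have hr0 : PySem.Int.mod (↑r : Int) 2 = 0 := by rw [hmod, hp]; norm_num
    rw [if_pos hr0]
    exact row_even w (↑r) hr0
  · have hr1 : PySem.Int.mod (↑r : Int) 2 = 1 := by rw [hmod, hp]; norm_num
    rw [if_neg (by rw [hr1]; norm_num)]
    exact row_odd w (↑r) hr1

-- ===== VERDICT (by name: the statement is the Claim_ definition above) =====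
theorem build_board_spec : Claim_equal_build_board := by
  intro width height _ hpre
  unfold Spec_build_board
  rcases lt_or_ge height 0 with hh | hh
  · exact main_neg width height hh
  · rcases hpre with hw | hneg
    · exact main_nonneg width height hw hh
    · omega
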